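-- pv_equiv track=rewrite | github.com/RealTeamRocket/pacman.ml | qlearning/qlearn.py | get_ghost_info
-- ===== SOURCE A (Python) =====
-- def get_ghost_info(state, px, py):
--     """
--     Get detailed ghost information for state encoding.
--     Returns: (min_dist, danger_dirs_bitmask, frightened_nearby, closest_ghost_quadrant)
--     """
--     ghosts = state.get('ghosts', [])
--
--     min_dangerous_dist = 100
--     frightened_nearby = 0
--     danger_dirs = 0  # Bitmask: up=1, down=2, left=4, right=8
--     closest_quadrant = 4  # 0=up-left, 1=up-right, 2=down-left, 3=down-right, 4=none
--
--     for ghost in ghosts: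
--         gs = ghost.get('state', 0)
--         gx = ghost.get('x', 0) // 8
--         gy = ghost.get('y', 0) // 8
--         dist = abs(gx - px) + abs(gy - py)
--
--         if gs == 3:  # Frightened
--             if dist <= 8:
--                 frightened_nearby += 1
--         elif gs in (0, 1, 2):  # Dangerous (scatter, chase, or house-leaving)
--             if dist < min_dangerous_dist:
--                 min_dangerous_dist = dist
--                 # Determine quadrant of closest ghost
--                 if gy <= py and gx <= px:
--                     closest_quadrant = 0  # up-left
--                 elif gy <= py and gx > px:
--                     closest_quadrant = 1  # up-right
--                 elif gy > py and gx <= px: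
--                     closest_quadrant = 2  # down-left
--                 else:
--                     closest_quadrant = 3  # down-right
--
--             # Mark dangerous directions (directions toward this ghost)
--             if dist <= 6:  # Only care about close ghosts
--                 if gy < py:  # Ghost is above
--                     danger_dirs |= 1  # up is dangerous
--                 elif gy > py:  # Ghost is below
--                     danger_dirs |= 2  # down is dangerous
--                 if gx < px:  # Ghost is left
--                     danger_dirs |= 4  # left is dangerous
--                 elif gx > px:  # Ghost is right
--                     danger_dirs |= 8  # right is dangerous
--
--     return min_dangerous_dist, danger_dirs, frightened_nearby, closest_quadrant
-- ===== SOURCE B (Python) =====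
-- def get_ghost_info(state, px, py):
--     """Same result as A via a partition/aggregate decomposition instead of one big stateful loop."""
--     infos = [(g.get('state', 0), g.get('x', 0) // 8, g.get('y', 0) // 8)
--              for g in state.get('ghosts', [])]
--     dang = [(abs(gx - px) + abs(gy - py), gx, gy)
--             for gs, gx, gy in infos if gs in (0, 1, 2)]
--     frightened_nearby = sum(1 for gs, gx, gy in infos
--                             if gs == 3 and abs(gx - px) + abs(gy - py) <= 8)
--     md = min((d for d, _, _ in dang), default=100)
--     if md < 100:
--         _, cgx, cgy = next(t for t in dang if t[0] == md)
--         min_dist = md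
--         closest_quadrant = (2 if cgy > py else 0) + (1 if cgx > px else 0)
--     else:
--         min_dist = 100
--         closest_quadrant = 4
--     danger_dirs = 0
--     for d, gx, gy in dang:
--         if d <= 6:
--             danger_dirs |= (1 if gy < py else 2 if gy > py else 0) \
--                          | (4 if gx < px else 8 if gx > px else 0)
--     return min_dist, danger_dirs, frightened_nearby, closest_quadrant
-- ===== Notes on version B (the rewrite author's own statement) =====
-- stated objective: alternative
-- what changed: A's single stateful loop carrying four running accumulators is replaced by a partition/aggregate decomposition: build the per-ghost info list and the dangerous sublist once, then count frightened ghosts with a filter, get the minimum distance with min(default=100) plus a first-match search for the closest ghost's quadrant, and OR-fold the direction bits over the close dangerous ghosts.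
import Mathlib
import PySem

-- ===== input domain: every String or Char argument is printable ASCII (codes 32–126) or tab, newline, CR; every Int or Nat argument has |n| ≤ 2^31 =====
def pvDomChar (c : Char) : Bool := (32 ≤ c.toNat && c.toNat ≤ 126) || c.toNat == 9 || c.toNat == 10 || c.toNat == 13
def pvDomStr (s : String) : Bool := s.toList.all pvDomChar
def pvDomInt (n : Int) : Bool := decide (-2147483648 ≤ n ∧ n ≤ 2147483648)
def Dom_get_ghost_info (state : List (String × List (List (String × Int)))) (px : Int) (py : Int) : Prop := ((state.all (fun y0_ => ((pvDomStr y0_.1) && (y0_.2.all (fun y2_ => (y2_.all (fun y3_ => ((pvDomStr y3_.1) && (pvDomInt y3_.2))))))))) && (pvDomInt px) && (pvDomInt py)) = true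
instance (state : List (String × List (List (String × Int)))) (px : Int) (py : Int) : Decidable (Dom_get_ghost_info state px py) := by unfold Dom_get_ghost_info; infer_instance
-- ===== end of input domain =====

-- B re-implements A by a partition/aggregate decomposition (build the dangerous-ghost list once,
-- then min/count/OR-fold over it) instead of A's single stateful loop; objective: alternative, same cost.

-- ===== PORT A =====
-- literal transliteration of A's single loop with four running accumulators (md, dd, fr, cq)
def get_ghost_info (state : List (String × List (List (String × Int)))) (px : Int) (py : Int) : Int × Int × Int × Int :=
  let ghosts := PySem.Dict.getD (PySem.Dict.mk state) "ghosts" []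
  ghosts.foldl (fun acc ghost =>
    let gs := PySem.Dict.getD (PySem.Dict.mk ghost) "state" 0
    let gx := PySem.Int.floordiv (PySem.Dict.getD (PySem.Dict.mk ghost) "x" 0) 8
    let gy := PySem.Int.floordiv (PySem.Dict.getD (PySem.Dict.mk ghost) "y" 0) 8
    let dist := |gx - px| + |gy - py|
    if gs = 3 then
      if dist ≤ 8 then (acc.1, acc.2.1, acc.2.2.1 + 1, acc.2.2.2) else acc
    else if gs = 0 ∨ gs = 1 ∨ gs = 2 then
      let mc : Int × Int :=
        if dist < acc.1 then
          (dist,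
           if gy ≤ py ∧ gx ≤ px then 0
           else if gy ≤ py ∧ gx > px then 1
           else if gy > py ∧ gx ≤ px then 2
           else 3)
        else (acc.1, acc.2.2.2)
      let dd :=
        if dist ≤ 6 then
          let dd1 := if gy < py then PySem.Int.bor acc.2.1 1
                     else if gy > py then PySem.Int.bor acc.2.1 2
                     else acc.2.1
          if gx < px then PySem.Int.bor dd1 4
          else if gx > px then PySem.Int.bor dd1 8
          else dd1
        else acc.2.1
      (mc.1, dd, acc.2.2.1, mc.2)
    else acc) (100, 0, 0, 4)

-- ===== PORT B =====
-- literal transliteration of Source B: per-ghost info list, dangerous sublist, then count / min+find / OR-fold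
def get_ghost_info_alt (state : List (String × List (List (String × Int)))) (px : Int) (py : Int) : Int × Int × Int × Int :=
  let infos := (PySem.Dict.getD (PySem.Dict.mk state) "ghosts" []).map (fun g =>
    (PySem.Dict.getD (PySem.Dict.mk g) "state" 0,
     PySem.Int.floordiv (PySem.Dict.getD (PySem.Dict.mk g) "x" 0) 8,
     PySem.Int.floordiv (PySem.Dict.getD (PySem.Dict.mk g) "y" 0) 8))
  let dang := (infos.filter (fun t => t.1 == 0 || t.1 == 1 || t.1 == 2)).map
      (fun t => (|t.2.1 - px| + |t.2.2 - py|, t.2.1, t.2.2))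
  let frightened_nearby : Int :=
    ((infos.filter (fun t => t.1 == 3 && decide (|t.2.1 - px| + |t.2.2 - py| ≤ 8))).length : Int)
  let md := PySem.List.minD (dang.map (fun t => t.1)) id 100
  let mc : Int × Int :=
    if md < 100 then
      -- next(t for t in dang if t[0] == md): cannot fail since md < 100 is attained in dang
      match dang.find? (fun t => t.1 == md) with
      | some u => (md, (if u.2.2 > py then 2 else 0) + (if u.2.1 > px then 1 else 0))
      | none => (md, 4)
    else (100, 4)
  let danger_dirs := dang.foldl (fun dd t =>
      if t.1 ≤ 6 then
        PySem.Int.bor dd (PySem.Int.bor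
          (if t.2.2 < py then 1 else if t.2.2 > py then 2 else 0)
          (if t.2.1 < px then 4 else if t.2.1 > px then 8 else 0))
      else dd) 0
  (mc.1, danger_dirs, frightened_nearby, mc.2)

-- ===== PRECONDITION & SPEC =====
def Spec_get_ghost_info (state : List (String × List (List (String × Int)))) (px : Int) (py : Int) (out : Int × Int × Int × Int) : Prop := out = get_ghost_info_alt state px py
instance (state : List (String × List (List (String × Int)))) (px : Int) (py : Int) (out : Int × Int × Int × Int) : Decidable (Spec_get_ghost_info state px py out) := by unfold Spec_get_ghost_info; infer_instance

-- ===== CLAIM (what is proved, stated in full; the proofs are below) =====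
def Claim_equal_get_ghost_info : Prop := ∀ (state : List (String × List (List (String × Int)))) (px : Int) (py : Int), Dom_get_ghost_info state px py → Spec_get_ghost_info state px py (get_ghost_info state px py)

-- ===== LEMMAS AND PROOFS =====

-- per-ghost extracted info (state, gx, gy)
def pvInfo (g : List (String × Int)) : Int × Int × Int :=
  (PySem.Dict.getD (PySem.Dict.mk g) "state" 0,
   PySem.Int.floordiv (PySem.Dict.getD (PySem.Dict.mk g) "x" 0) 8,
   PySem.Int.floordiv (PySem.Dict.getD (PySem.Dict.mk g) "y" 0) 8)

-- A's loop body as a function of the extracted info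
def pvStepA (px py : Int) (acc : Int × Int × Int × Int) (t : Int × Int × Int) : Int × Int × Int × Int :=
  let gs := t.1; let gx := t.2.1; let gy := t.2.2
  let dist := |gx - px| + |gy - py|
  if gs = 3 then
    if dist ≤ 8 then (acc.1, acc.2.1, acc.2.2.1 + 1, acc.2.2.2) else acc
  else if gs = 0 ∨ gs = 1 ∨ gs = 2 then
    let mc : Int × Int :=
      if dist < acc.1 then
        (dist,
         if gy ≤ py ∧ gx ≤ px then 0
         else if gy ≤ py ∧ gx > px then 1
         else if gy > py ∧ gx ≤ px then 2
         else 3)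
      else (acc.1, acc.2.2.2)
    let dd :=
      if dist ≤ 6 then
        let dd1 := if gy < py then PySem.Int.bor acc.2.1 1
                   else if gy > py then PySem.Int.bor acc.2.1 2
                   else acc.2.1
        if gx < px then PySem.Int.bor dd1 4
        else if gx > px then PySem.Int.bor dd1 8
        else dd1
      else acc.2.1
    (mc.1, dd, acc.2.2.1, mc.2)
  else acc

def pvAfold (px py : Int) (L : List (Int × Int × Int)) : Int × Int × Int × Int :=
  L.foldl (pvStepA px py) (100, 0, 0, 4)

def pvDang (px py : Int) (L : List (Int × Int × Int)) : List (Int × Int × Int) :=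
  (L.filter (fun t => t.1 == 0 || t.1 == 1 || t.1 == 2)).map
    (fun t => (|t.2.1 - px| + |t.2.2 - py|, t.2.1, t.2.2))

def pvDirStep (px py : Int) (dd : Int) (t : Int × Int × Int) : Int :=
  if t.1 ≤ 6 then
    PySem.Int.bor dd (PySem.Int.bor
      (if t.2.2 < py then 1 else if t.2.2 > py then 2 else 0)
      (if t.2.1 < px then 4 else if t.2.1 > px then 8 else 0))
  else dd

-- B's min-dist / closest-quadrant aggregate over the dangerous list
def pvMC (px py : Int) (dang : List (Int × Int × Int)) : Int × Int :=
  let md := PySem.List.minD (dang.map (fun t => t.1)) id 100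
  if md < 100 then
    match dang.find? (fun t => t.1 == md) with
    | some u => (md, (if u.2.2 > py then 2 else 0) + (if u.2.1 > px then 1 else 0))
    | none => (md, 4)
  else (100, 4)

def pvB (px py : Int) (L : List (Int × Int × Int)) : Int × Int × Int × Int :=
  let dang := pvDang px py L
  let frightened_nearby : Int :=
    ((L.filter (fun t => t.1 == 3 && decide (|t.2.1 - px| + |t.2.2 - py| ≤ 8))).length : Int)
  let mc := pvMC px py dang
  (mc.1, dang.foldl (pvDirStep px py) 0, frightened_nearby, mc.2)

lemma pvA_eq (state : List (String × List (List (String × Int)))) (px py : Int) :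
    get_ghost_info state px py = pvAfold px py ((PySem.Dict.getD (PySem.Dict.mk state) "ghosts" []).map pvInfo) := by
  simp only [pvAfold, List.foldl_map]
  rfl

lemma pvB_eq (state : List (String × List (List (String × Int)))) (px py : Int) :
    get_ghost_info_alt state px py = pvB px py ((PySem.Dict.getD (PySem.Dict.mk state) "ghosts" []).map pvInfo) := by
  rfl


lemma pvDang_append (px py : Int) (L : List (Int × Int × Int)) (t : Int × Int × Int) :
    pvDang px py (L ++ [t]) = pvDang px py L ++
      (if t.1 = 0 ∨ t.1 = 1 ∨ t.1 = 2 then [(|t.2.1 - px| + |t.2.2 - py|, t.2.1, t.2.2)] else []) := by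
  simp only [pvDang, List.filter_append, List.map_append]
  congr 1
  by_cases h : t.1 = 0 ∨ t.1 = 1 ∨ t.1 = 2
  · rcases h with h | h | h <;> simp [List.filter, h]
  · have h0 : ¬ t.1 = 0 := fun hc => h (Or.inl hc)
    have h1 : ¬ t.1 = 1 := fun hc => h (Or.inr (Or.inl hc))
    have h2 : ¬ t.1 = 2 := fun hc => h (Or.inr (Or.inr hc))
    have hb : (t.1 == 0 || t.1 == 1 || t.1 == 2) = false := by simp [h0, h1, h2]
    simp [List.filter, hb]
    exact ⟨h0, h1, h2⟩

lemma pv_min?_append (ds : List Int) (d : Int) :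
    PySem.List.min? (ds ++ [d]) id =
      match PySem.List.min? ds id with
      | none => some d
      | some m => if d < m then some d else some m := by
  cases h : PySem.List.min? ds id with
  | none =>
    simp only [PySem.List.min?, id] at h ⊢
    rw [List.foldl_append, h]
    rfl
  | some m =>
    simp only [PySem.List.min?, id] at h ⊢
    rw [List.foldl_append, h]
    rfl

lemma pv_bor_nonneg (a b : Int) (ha : 0 ≤ a) (hb : 0 ≤ b) : 0 ≤ PySem.Int.bor a b := by
  rw [PySem.Int.bor_of_nonneg ha hb]; exact Int.natCast_nonneg _

lemma pv_bor_assoc (dd a b : Int) (hdd : 0 ≤ dd) (ha : 0 ≤ a) (hb : 0 ≤ b) :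
    PySem.Int.bor (PySem.Int.bor dd a) b = PySem.Int.bor dd (PySem.Int.bor a b) := by
  rw [PySem.Int.bor_of_nonneg hdd ha, PySem.Int.bor_of_nonneg ha hb,
      PySem.Int.bor_of_nonneg (by positivity : (0:Int) ≤ ((dd.toNat ||| a.toNat : Nat) : Int)) hb,
      PySem.Int.bor_of_nonneg hdd (by positivity : (0:Int) ≤ ((a.toNat ||| b.toNat : Nat) : Int))]
  simp [Nat.lor_assoc]

lemma pvDir_nonneg (px py : Int) (L : List (Int × Int × Int)) (dd : Int) (h : 0 ≤ dd) :
    0 ≤ List.foldl (pvDirStep px py) dd L := by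
  induction L generalizing dd with
  | nil => simpa
  | cons t l ih =>
    rw [List.foldl_cons]
    apply ih
    unfold pvDirStep
    split_ifs <;> first | exact h | exact pv_bor_nonneg _ _ h (by decide)

lemma pv_dir_chain (px py gx gy dd : Int) (h : 0 ≤ dd) :
    (if |gx - px| + |gy - py| ≤ 6 then
       (if gx < px then
          PySem.Int.bor (if gy < py then PySem.Int.bor dd 1 else if gy > py then PySem.Int.bor dd 2 else dd) 4
        else if gx > px then
          PySem.Int.bor (if gy < py then PySem.Int.bor dd 1 else if gy > py then PySem.Int.bor dd 2 else dd) 8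
        else (if gy < py then PySem.Int.bor dd 1 else if gy > py then PySem.Int.bor dd 2 else dd))
     else dd)
    = pvDirStep px py dd (|gx - px| + |gy - py|, gx, gy) := by
  unfold pvDirStep
  simp only
  split_ifs <;>
    simp_all [show PySem.Int.bor 1 4 = 5 from by decide, show PySem.Int.bor 1 8 = 9 from by decide,
      show PySem.Int.bor 2 4 = 6 from by decide, show PySem.Int.bor 2 8 = 10 from by decide,
      show PySem.Int.bor 0 4 = 4 from by decide, show PySem.Int.bor 0 8 = 8 from by decide,
      show PySem.Int.bor 1 0 = 1 from by decide, show PySem.Int.bor 2 0 = 2 from by decide,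
      show PySem.Int.bor 0 0 = 0 from by decide, PySem.Int.bor_zero,
      pv_bor_assoc dd 1 4 h, pv_bor_assoc dd 1 8 h, pv_bor_assoc dd 2 4 h, pv_bor_assoc dd 2 8 h]

lemma pv_quad_eq (px py gx gy : Int) :
    (if gy ≤ py ∧ gx ≤ px then (0:Int)
     else if gy ≤ py ∧ gx > px then 1
     else if gy > py ∧ gx ≤ px then 2
     else 3)
    = (if gy > py then 2 else 0) + (if gx > px then 1 else 0) := by
  split_ifs <;> omega


lemma pvMC_fst (px py m : Int) (D : List (Int × Int × Int))
    (hm : PySem.List.min? (D.map (fun t => t.1)) id = some m) :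
    (pvMC px py D).1 = if m < 100 then m else 100 := by
  have hmd : PySem.List.minD (D.map (fun t => t.1)) id 100 = m := by
    simp [PySem.List.minD, hm]
  simp only [pvMC, hmd]
  split_ifs with h
  · cases List.find? (fun t => t.1 == m) D <;> rfl
  · rfl

lemma pvMC_append (px py d gx gy : Int) (D : List (Int × Int × Int)) :
    pvMC px py (D ++ [(d, gx, gy)]) =
      if d < (pvMC px py D).1 then
        (d, (if gy > py then 2 else 0) + (if gx > px then 1 else 0))
      else pvMC px py D := by
  cases hm : PySem.List.min? (D.map (fun t => t.1)) id with
  | none =>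
    have hD : D = [] := List.map_eq_nil_iff.mp ((PySem.List.min?_eq_none_iff _ _).mp hm)
    subst hD
    by_cases h : d < 100 <;>
      simp [pvMC, PySem.List.minD, PySem.List.min?, h]
  | some m =>
    have hmd : PySem.List.minD (D.map (fun t => t.1)) id 100 = m := by
      simp [PySem.List.minD, hm]
    have hle : ∀ y ∈ D.map (fun t => t.1), m ≤ y := PySem.List.min?_id_le hm
    obtain ⟨w, hwD, hw1⟩ := List.mem_map.mp (PySem.List.min?_mem hm)
    have hfst := pvMC_fst px py m D hm
    have hminnew : PySem.List.minD ((D ++ [(d, gx, gy)]).map (fun t => t.1)) id 100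
        = if d < m then d else m := by
      simp only [List.map_append, List.map_cons, List.map_nil, PySem.List.minD]
      rw [pv_min?_append, hm]
      split_ifs with h <;> simp [h]
    by_cases hdm : d < m
    · have hnone : List.find? (fun t => t.1 == d) D = none := by
        rw [List.find?_eq_none]
        intro x hx
        have := hle x.1 (List.mem_map_of_mem hx)
        simp only [beq_iff_eq]
        omega
      have hfind : List.find? (fun t => t.1 == d) (D ++ [(d, gx, gy)]) = some (d, gx, gy) := by
        rw [List.find?_append, hnone]
        simp
      by_cases hd100 : d < 100
      · have hcond : d < (pvMC px py D).1 := by rw [hfst]; split_ifs <;> omega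
        rw [if_pos hcond]
        simp only [pvMC, hminnew, if_pos hdm, if_pos hd100, hfind]
      · have hcond : ¬ d < (pvMC px py D).1 := by rw [hfst]; split_ifs <;> omega
        rw [if_neg hcond]
        have hm100 : ¬ m < 100 := by omega
        simp only [pvMC, hminnew, hmd, if_pos hdm, if_neg hd100, if_neg hm100]
    · have hsome : ∃ w', List.find? (fun t => t.1 == m) D = some w' := by
        have : (List.find? (fun t => t.1 == m) D).isSome := by
          rw [List.find?_isSome]
          exact ⟨w, hwD, by simp [hw1]⟩
        exact Option.isSome_iff_exists.mp this
      obtain ⟨w', hw'⟩ := hsome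
      have hfind : List.find? (fun t => t.1 == m) (D ++ [(d, gx, gy)]) = some w' := by
        rw [List.find?_append, hw']
        rfl
      have hcond : ¬ d < (pvMC px py D).1 := by rw [hfst]; split_ifs <;> omega
      rw [if_neg hcond]
      by_cases hm100 : m < 100
      · simp only [pvMC, hminnew, hmd, if_neg hdm, if_pos hm100, hfind, hw']
      · simp only [pvMC, hminnew, hmd, if_neg hdm, if_neg hm100]

lemma pv_main (px py : Int) (L : List (Int × Int × Int)) :
    pvAfold px py L = pvB px py L := by
  induction L using List.reverseRecOn with
  | nil => rfl
  | append_singleton l t ih =>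
    have hstep : pvAfold px py (l ++ [t]) = pvStepA px py (pvAfold px py l) t := by
      simp [pvAfold, List.foldl_append]
    rw [hstep, ih]
    obtain ⟨gs, gx, gy⟩ := t
    by_cases h3 : gs = 3
    · subst h3
      have hdang : pvDang px py (l ++ [(3, gx, gy)]) = pvDang px py l := by
        rw [pvDang_append]; norm_num
      simp only [pvB, pvStepA, hdang, List.filter_append, List.filter]
      norm_num
      by_cases h8 : |gx - px| + |gy - py| ≤ 8 <;> simp [h8]
    · by_cases hgs : gs = 0 ∨ gs = 1 ∨ gs = 2
      · have hdang : pvDang px py (l ++ [(gs, gx, gy)]) =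
            pvDang px py l ++ [(|gx - px| + |gy - py|, gx, gy)] := by
          rw [pvDang_append]; simp [hgs]
        have hfr : (l ++ [(gs, gx, gy)]).filter
              (fun t => t.1 == 3 && decide (|t.2.1 - px| + |t.2.2 - py| ≤ 8))
            = l.filter (fun t => t.1 == 3 && decide (|t.2.1 - px| + |t.2.2 - py| ≤ 8)) := by
          have hb : (gs == 3) = false := by simp [h3]
          simp [List.filter_append, List.filter, hb]
        have hdd0 : (0:Int) ≤ (pvDang px py l).foldl (pvDirStep px py) 0 :=
          pvDir_nonneg px py _ 0 le_rfl
        simp only [pvB, pvStepA, hdang, hfr, if_neg h3, if_pos hgs]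
        rw [pvMC_append]
        rw [List.foldl_append, List.foldl_cons, List.foldl_nil]
        rw [← pv_dir_chain px py gx gy _ hdd0]
        rw [pv_quad_eq px py gx gy]
      · have hdang : pvDang px py (l ++ [(gs, gx, gy)]) = pvDang px py l := by
          rw [pvDang_append]; simp [hgs]
        have hfr : (l ++ [(gs, gx, gy)]).filter
              (fun t => t.1 == 3 && decide (|t.2.1 - px| + |t.2.2 - py| ≤ 8))
            = l.filter (fun t => t.1 == 3 && decide (|t.2.1 - px| + |t.2.2 - py| ≤ 8)) := by
          have hb : (gs == 3) = false := by simp [h3]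
          simp [List.filter_append, List.filter, hb]
        simp only [pvB, pvStepA, hdang, hfr, if_neg h3, if_neg hgs]

-- ===== VERDICT (by name: the statement is the Claim_ definition above) =====
theorem get_ghost_info_spec : Claim_equal_get_ghost_info := by
  intro state px py _
  unfold Spec_get_ghost_info
  rw [pvA_eq, pvB_eq, pv_main]
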